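-- pv_equiv track=rewrite | github.com/hwitzthum/Value-Proposition-Canvas | ui/streamlit_app.py | infer_item_metadata
-- ===== SOURCE A (Python) =====
-- def infer_item_metadata(text: str, item_type: str) -> dict:
--     """Infer lightweight metadata chips for list cards."""
--     lowered = text.lower()
--     words = max(1, len(text.split()))
--
--     if item_type == "pain":
--         if any(token in lowered for token in ["delay", "blocked", "risk", "urgent", "critical"]):
--             urgency = "high urgency"
--         elif any(token in lowered for token in ["slow", "manual", "rework", "waiting"]):
--             urgency = "medium urgency"
--         else:
--             urgency = "steady friction"
--     else:
--         if any(token in lowered for token in ["revenue", "growth", "customer", "value", "impact"]):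
--             urgency = "high impact"
--         elif any(token in lowered for token in ["clear", "faster", "quality", "focus"]):
--             urgency = "medium impact"
--         else:
--             urgency = "future upside"
--
--     if any(token in lowered for token in ["team", "stakeholder", "customer", "leadership"]):
--         category = "collaboration"
--     elif any(token in lowered for token in ["report", "document", "analysis", "data", "metric"]):
--         category = "information flow"
--     elif any(token in lowered for token in ["tool", "system", "automation", "process"]):
--         category = "operations"
--     else:
--         category = "execution"
--
--     confidence = "high confidence" if words >= 10 else "draft confidence"
--     return {"category": category, "urgency": urgency, "confidence": confidence}
-- ===== SOURCE B (Python) =====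
-- # Inverted keyword index: one flat scan over all keywords accumulates the best
-- # (lowest) matched tier per field; labels are picked from tier tables afterwards.
-- _INDEX = {
--     "delay": (("pain", 0),), "blocked": (("pain", 0),), "risk": (("pain", 0),),
--     "urgent": (("pain", 0),), "critical": (("pain", 0),),
--     "slow": (("pain", 1),), "manual": (("pain", 1),),
--     "rework": (("pain", 1),), "waiting": (("pain", 1),),
--     "revenue": (("gain", 0),), "growth": (("gain", 0),),
--     "customer": (("gain", 0), ("category", 0)),
--     "value": (("gain", 0),), "impact": (("gain", 0),),
--     "clear": (("gain", 1),), "faster": (("gain", 1),),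
--     "quality": (("gain", 1),), "focus": (("gain", 1),),
--     "team": (("category", 0),), "stakeholder": (("category", 0),),
--     "leadership": (("category", 0),),
--     "report": (("category", 1),), "document": (("category", 1),),
--     "analysis": (("category", 1),), "data": (("category", 1),),
--     "metric": (("category", 1),),
--     "tool": (("category", 2),), "system": (("category", 2),),
--     "automation": (("category", 2),), "process": (("category", 2),),
-- }
--
-- _LABELS = {
--     "category": ("collaboration", "information flow", "operations", "execution"),
--     "pain": ("high urgency", "medium urgency", "steady friction"),
--     "gain": ("high impact", "medium impact", "future upside"),
-- }
--
--
-- def infer_item_metadata(text: str, item_type: str) -> dict: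
--     """Infer lightweight metadata chips for list cards (inverted keyword index)."""
--     lowered = text.lower()
--     best = {"category": 3, "pain": 2, "gain": 2}  # defaults = last tier of each table
--     for keyword, entries in _INDEX.items():
--         if keyword in lowered:
--             for field, tier in entries:
--                 if tier < best[field]:
--                     best[field] = tier
--     urgency_field = "pain" if item_type == "pain" else "gain"
--     words = max(1, len(text.split()))
--     return {
--         "category": _LABELS["category"][best["category"]],
--         "urgency": _LABELS[urgency_field][best[urgency_field]],
--         "confidence": "high confidence" if words >= 10 else "draft confidence",
--     }
-- ===== Notes on version B (the rewrite author's own statement) =====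
-- stated objective: alternative
-- what changed: Replaces the ordered if/elif first-match cascades by an inverted keyword-to-(field,tier) index scanned once, accumulating the minimum matched tier per field (both urgency fields computed, one selected), then mapping tiers to labels; shared keywords like 'customer' are tested once.
import Mathlib
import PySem

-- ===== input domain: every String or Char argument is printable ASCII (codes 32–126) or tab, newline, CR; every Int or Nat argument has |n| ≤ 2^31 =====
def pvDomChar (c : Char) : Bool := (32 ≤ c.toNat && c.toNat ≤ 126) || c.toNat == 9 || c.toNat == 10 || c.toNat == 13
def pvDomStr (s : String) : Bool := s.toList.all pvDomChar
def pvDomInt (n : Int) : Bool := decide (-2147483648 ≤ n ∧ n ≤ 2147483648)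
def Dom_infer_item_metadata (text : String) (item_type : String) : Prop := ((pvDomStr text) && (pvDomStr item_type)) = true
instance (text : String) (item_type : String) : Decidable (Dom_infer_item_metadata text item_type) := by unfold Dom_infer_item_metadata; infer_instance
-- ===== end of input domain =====

-- B replaces A's if/elif cascades by one flat scan of an inverted keyword index
-- accumulating the minimum matched tier per field; same results (alternative).

-- ===== PORT A =====
-- literal transliteration of A's if/elif cascades ('token in lowered' = PySem.Str.isIn)
def infer_item_metadata (text : String) (item_type : String) : List (String × String) :=
  let lowered := PySem.Str.lower text
  let words : Int := max 1 ((PySem.Str.split₀ text).length : Int)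
  let urgency :=
    if item_type == "pain" then
      if ["delay", "blocked", "risk", "urgent", "critical"].any (fun token => PySem.Str.isIn token lowered) then
        "high urgency"
      else if ["slow", "manual", "rework", "waiting"].any (fun token => PySem.Str.isIn token lowered) then
        "medium urgency"
      else
        "steady friction"
    else
      if ["revenue", "growth", "customer", "value", "impact"].any (fun token => PySem.Str.isIn token lowered) then
        "high impact"
      else if ["clear", "faster", "quality", "focus"].any (fun token => PySem.Str.isIn token lowered) then
        "medium impact"
      else
        "future upside"
  let category :=
    if ["team", "stakeholder", "customer", "leadership"].any (fun token => PySem.Str.isIn token lowered) then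
      "collaboration"
    else if ["report", "document", "analysis", "data", "metric"].any (fun token => PySem.Str.isIn token lowered) then
      "information flow"
    else if ["tool", "system", "automation", "process"].any (fun token => PySem.Str.isIn token lowered) then
      "operations"
    else
      "execution"
  let confidence := if words ≥ 10 then "high confidence" else "draft confidence"
  [("category", category), ("urgency", urgency), ("confidence", confidence)]

-- ===== PORT B =====
-- Source B's _INDEX dict, in insertion order: keyword -> list of (field, tier)
def pvIndex : List (String × List (String × Int)) :=
  [ ("delay", [("pain", 0)]), ("blocked", [("pain", 0)]), ("risk", [("pain", 0)]),
    ("urgent", [("pain", 0)]), ("critical", [("pain", 0)]),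
    ("slow", [("pain", 1)]), ("manual", [("pain", 1)]),
    ("rework", [("pain", 1)]), ("waiting", [("pain", 1)]),
    ("revenue", [("gain", 0)]), ("growth", [("gain", 0)]),
    ("customer", [("gain", 0), ("category", 0)]),
    ("value", [("gain", 0)]), ("impact", [("gain", 0)]),
    ("clear", [("gain", 1)]), ("faster", [("gain", 1)]),
    ("quality", [("gain", 1)]), ("focus", [("gain", 1)]),
    ("team", [("category", 0)]), ("stakeholder", [("category", 0)]),
    ("leadership", [("category", 0)]),
    ("report", [("category", 1)]), ("document", [("category", 1)]),
    ("analysis", [("category", 1)]), ("data", [("category", 1)]),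
    ("metric", [("category", 1)]),
    ("tool", [("category", 2)]), ("system", [("category", 2)]),
    ("automation", [("category", 2)]), ("process", [("category", 2)]) ]

-- Source B's `best` dict has the three fixed keys category/pain/gain: ported as a triple
def pvBestGet (b : Int × Int × Int) (field : String) : Int :=
  if field == "category" then b.1 else if field == "pain" then b.2.1 else b.2.2

def pvBestSet (b : Int × Int × Int) (field : String) (tier : Int) : Int × Int × Int :=
  if field == "category" then (tier, b.2.1, b.2.2)
  else if field == "pain" then (b.1, tier, b.2.2)
  else (b.1, b.2.1, tier)

-- Source B's _LABELS dict (fixed keys)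
def pvLabels (field : String) : List String :=
  if field == "category" then ["collaboration", "information flow", "operations", "execution"]
  else if field == "pain" then ["high urgency", "medium urgency", "steady friction"]
  else ["high impact", "medium impact", "future upside"]

-- the scan loop of Source B: best tier per field, starting at the defaults (3, 2, 2)
def pvScan (lowered : String) : Int × Int × Int :=
  pvIndex.foldl
    (fun best kv =>
      if PySem.Str.isIn kv.1 lowered then
        kv.2.foldl (fun b ft => if ft.2 < pvBestGet b ft.1 then pvBestSet b ft.1 ft.2 else b) best
      else best)
    (3, 2, 2)

def infer_item_metadata_alt (text : String) (item_type : String) : List (String × String) :=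
  let lowered := PySem.Str.lower text
  let best := pvScan lowered
  let urgency_field := if item_type == "pain" then "pain" else "gain"
  let words : Int := max 1 ((PySem.Str.split₀ text).length : Int)
  -- tuple indexing _LABELS[f][best[f]]: the accumulated tier is always in range
  [ ("category", PySem.List.pyGetD (pvLabels "category") (pvBestGet best "category") ""),
    ("urgency", PySem.List.pyGetD (pvLabels urgency_field) (pvBestGet best urgency_field) ""),
    ("confidence", if words ≥ 10 then "high confidence" else "draft confidence") ]

-- ===== PRECONDITION & SPEC =====
def Spec_infer_item_metadata (text : String) (item_type : String) (out : List (String × String)) : Prop := out = infer_item_metadata_alt text item_type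
instance (text : String) (item_type : String) (out : List (String × String)) : Decidable (Spec_infer_item_metadata text item_type out) := by unfold Spec_infer_item_metadata; infer_instance

-- ===== CLAIM (what is proved, stated in full; the proofs are below) =====
def Claim_equal_infer_item_metadata : Prop := ∀ (text : String) (item_type : String), Dom_infer_item_metadata text item_type → Spec_infer_item_metadata text item_type (infer_item_metadata text item_type)

-- ===== LEMMAS AND PROOFS =====

-- scalar views of one field of Source B's scan: the inner tier update, per field
def pvInner (f : String) (a : Int) (ft : String × Int) : Int :=
  if ft.1 == f then (if ft.2 < a then ft.2 else a) else a

-- the triple's last component stands for every key other than category/pain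
def pvInnerGain (a : Int) (ft : String × Int) : Int :=
  if ft.1 == "category" then a else if ft.1 == "pain" then a
  else (if ft.2 < a then ft.2 else a)

theorem pvInner_fst (entries : List (String × Int)) (b : Int × Int × Int) :
    (entries.foldl (fun b ft => if ft.2 < pvBestGet b ft.1 then pvBestSet b ft.1 ft.2 else b) b).1
    = entries.foldl (pvInner "category") b.1 := by
  induction entries generalizing b with
  | nil => rfl
  | cons ft rest ih =>
    simp only [List.foldl_cons, ih]
    congr 1
    unfold pvBestGet pvBestSet pvInner
    by_cases h1 : ft.1 == "category" <;> by_cases h2 : ft.1 == "pain" <;>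
      simp only [h1, h2, if_true, if_false, Bool.false_eq_true] <;> split_ifs <;> simp_all

theorem pvInner_pain (entries : List (String × Int)) (b : Int × Int × Int) :
    (entries.foldl (fun b ft => if ft.2 < pvBestGet b ft.1 then pvBestSet b ft.1 ft.2 else b) b).2.1
    = entries.foldl (pvInner "pain") b.2.1 := by
  induction entries generalizing b with
  | nil => rfl
  | cons ft rest ih =>
    simp only [List.foldl_cons, ih]
    congr 1
    unfold pvBestGet pvBestSet pvInner
    by_cases h1 : ft.1 == "category" <;> by_cases h2 : ft.1 == "pain" <;>
      simp only [h1, h2, if_true, if_false, Bool.false_eq_true] <;> split_ifs <;> simp_all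

theorem pvInner_gain (entries : List (String × Int)) (b : Int × Int × Int) :
    (entries.foldl (fun b ft => if ft.2 < pvBestGet b ft.1 then pvBestSet b ft.1 ft.2 else b) b).2.2
    = entries.foldl pvInnerGain b.2.2 := by
  induction entries generalizing b with
  | nil => rfl
  | cons ft rest ih =>
    simp only [List.foldl_cons, ih]
    congr 1
    unfold pvBestGet pvBestSet pvInnerGain
    by_cases h1 : ft.1 == "category" <;> by_cases h2 : ft.1 == "pain" <;>
      simp only [h1, h2, if_true, if_false, Bool.false_eq_true] <;> split_ifs <;> simp_all

theorem pvScan_fst (l : String) (idx : List (String × List (String × Int))) (st : Int × Int × Int) :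
    (idx.foldl (fun best kv => if PySem.Str.isIn kv.1 l then
        kv.2.foldl (fun b ft => if ft.2 < pvBestGet b ft.1 then pvBestSet b ft.1 ft.2 else b) best
      else best) st).1
    = idx.foldl (fun a kv => if PySem.Str.isIn kv.1 l then kv.2.foldl (pvInner "category") a else a) st.1 := by
  induction idx generalizing st with
  | nil => rfl
  | cons kv rest ih =>
    simp only [List.foldl_cons]
    rw [ih]
    congr 1
    split_ifs
    · exact pvInner_fst kv.2 st
    · rfl

theorem pvScan_pain (l : String) (idx : List (String × List (String × Int))) (st : Int × Int × Int) :
    (idx.foldl (fun best kv => if PySem.Str.isIn kv.1 l then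
        kv.2.foldl (fun b ft => if ft.2 < pvBestGet b ft.1 then pvBestSet b ft.1 ft.2 else b) best
      else best) st).2.1
    = idx.foldl (fun a kv => if PySem.Str.isIn kv.1 l then kv.2.foldl (pvInner "pain") a else a) st.2.1 := by
  induction idx generalizing st with
  | nil => rfl
  | cons kv rest ih =>
    simp only [List.foldl_cons]
    rw [ih]
    congr 1
    split_ifs
    · exact pvInner_pain kv.2 st
    · rfl

theorem pvScan_gain (l : String) (idx : List (String × List (String × Int))) (st : Int × Int × Int) :
    (idx.foldl (fun best kv => if PySem.Str.isIn kv.1 l then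
        kv.2.foldl (fun b ft => if ft.2 < pvBestGet b ft.1 then pvBestSet b ft.1 ft.2 else b) best
      else best) st).2.2
    = idx.foldl (fun a kv => if PySem.Str.isIn kv.1 l then kv.2.foldl pvInnerGain a else a) st.2.2 := by
  induction idx generalizing st with
  | nil => rfl
  | cons kv rest ih =>
    simp only [List.foldl_cons]
    rw [ih]
    congr 1
    split_ifs
    · exact pvInner_gain kv.2 st
    · rfl

-- per-field views of pvBestGet on the three concrete keys
theorem pvBestGet_cat (b : Int × Int × Int) : pvBestGet b "category" = b.1 := rfl
theorem pvBestGet_pain (b : Int × Int × Int) : pvBestGet b "pain" = b.2.1 := rfl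
theorem pvBestGet_gain (b : Int × Int × Int) : pvBestGet b "gain" = b.2.2 := rfl

theorem pv_ite_min (t a : Int) : (if t < a then t else a) = min a t := by
  rw [min_def]; split_ifs <;> omega

-- which tier (if any) an entry contributes to field f
def pvFilt (f : String) (ft : String × Int) : Option Int :=
  if ft.1 == f then some ft.2 else none

def pvFiltGain (ft : String × Int) : Option Int :=
  if ft.1 == "category" then none else if ft.1 == "pain" then none else some ft.2

theorem foldl_inner_filt (f : String) (entries : List (String × Int)) (a : Int) :
    entries.foldl (pvInner f) a = (entries.filterMap (pvFilt f)).foldl min a := by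
  induction entries generalizing a with
  | nil => rfl
  | cons ft rest ih =>
    simp only [List.foldl_cons]
    by_cases h : ft.1 == f
    · rw [List.filterMap_cons_some (by simp [pvFilt, h] : pvFilt f ft = some ft.2)]
      simp only [List.foldl_cons, ih, pvInner, h, if_true, pv_ite_min]
    · rw [List.filterMap_cons_none (by simp [pvFilt, h])]
      simp only [ih, pvInner, h, if_false, Bool.false_eq_true]

theorem foldl_inner_filt_gain (entries : List (String × Int)) (a : Int) :
    entries.foldl pvInnerGain a = (entries.filterMap pvFiltGain).foldl min a := by
  induction entries generalizing a with
  | nil => rfl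
  | cons ft rest ih =>
    simp only [List.foldl_cons]
    by_cases h1 : ft.1 == "category"
    · rw [List.filterMap_cons_none (by simp [pvFiltGain, h1])]
      simp only [ih, pvInnerGain, h1, if_true]
    · by_cases h2 : ft.1 == "pain"
      · rw [List.filterMap_cons_none (by simp [pvFiltGain, h1, h2])]
        simp only [ih, pvInnerGain, h1, h2, if_true, if_false, Bool.false_eq_true]
      · rw [List.filterMap_cons_some (show pvFiltGain ft = some ft.2 by simp [pvFiltGain, h1, h2])]
        simp only [List.foldl_cons, ih, pvInnerGain, h1, h2, if_false, Bool.false_eq_true,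
          pv_ite_min]

theorem fold_as_min (l f : String) (idx : List (String × List (String × Int))) (a : Int) :
    idx.foldl (fun a kv => if PySem.Str.isIn kv.1 l then kv.2.foldl (pvInner f) a else a) a
    = (idx.flatMap (fun kv => if PySem.Str.isIn kv.1 l then kv.2.filterMap (pvFilt f) else [])).foldl min a := by
  induction idx generalizing a with
  | nil => rfl
  | cons kv rest ih =>
    simp only [List.foldl_cons, List.flatMap_cons, List.foldl_append]
    rw [ih]
    congr 1
    split_ifs
    · exact foldl_inner_filt f kv.2 a
    · rfl

theorem fold_as_min_gain (l : String) (idx : List (String × List (String × Int))) (a : Int) :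
    idx.foldl (fun a kv => if PySem.Str.isIn kv.1 l then kv.2.foldl pvInnerGain a else a) a
    = (idx.flatMap (fun kv => if PySem.Str.isIn kv.1 l then kv.2.filterMap pvFiltGain else [])).foldl min a := by
  induction idx generalizing a with
  | nil => rfl
  | cons kv rest ih =>
    simp only [List.foldl_cons, List.flatMap_cons, List.foldl_append]
    rw [ih]
    congr 1
    split_ifs
    · exact foldl_inner_filt_gain kv.2 a
    · rfl

-- the contributions of pvIndex's concrete entry lists, per field
theorem filtCat_p (t : Int) : List.filterMap (pvFilt "category") [("pain", t)] = [] := rfl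
theorem filtCat_g (t : Int) : List.filterMap (pvFilt "category") [("gain", t)] = [] := rfl
theorem filtCat_c (t : Int) : List.filterMap (pvFilt "category") [("category", t)] = [t] := rfl
theorem filtCat_cust (t u : Int) :
    List.filterMap (pvFilt "category") [("gain", t), ("category", u)] = [u] := rfl
theorem filtPain_p (t : Int) : List.filterMap (pvFilt "pain") [("pain", t)] = [t] := rfl
theorem filtPain_g (t : Int) : List.filterMap (pvFilt "pain") [("gain", t)] = [] := rfl
theorem filtPain_c (t : Int) : List.filterMap (pvFilt "pain") [("category", t)] = [] := rfl
theorem filtPain_cust (t u : Int) :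
    List.filterMap (pvFilt "pain") [("gain", t), ("category", u)] = [] := rfl
theorem filtGain_p (t : Int) : List.filterMap pvFiltGain [("pain", t)] = [] := rfl
theorem filtGain_g (t : Int) : List.filterMap pvFiltGain [("gain", t)] = [t] := rfl
theorem filtGain_c (t : Int) : List.filterMap pvFiltGain [("category", t)] = [] := rfl
theorem filtGain_cust (t u : Int) :
    List.filterMap pvFiltGain [("gain", t), ("category", u)] = [t] := rfl

-- ===== VERDICT (by name: the statement is the Claim_ definition above) =====
set_option maxHeartbeats 2000000 in
theorem infer_item_metadata_spec : Claim_equal_infer_item_metadata := by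
  intro text item_type _
  unfold Spec_infer_item_metadata infer_item_metadata infer_item_metadata_alt pvScan
  by_cases hp : item_type == "pain"
  · simp only [hp, if_true, List.cons.injEq, Prod.mk.injEq, true_and, and_true]
    refine ⟨?_, ?_⟩
    · rw [pvBestGet_cat, pvScan_fst, fold_as_min]
      simp only [pvIndex, List.flatMap_cons, List.flatMap_nil, filtCat_p, filtCat_g, filtCat_c,
        filtCat_cust, ite_self, List.nil_append, List.append_nil, List.any_cons, List.any_nil,
        Bool.or_false]
      generalize PySem.Str.isIn "customer" (PySem.Str.lower text) = b1
      generalize PySem.Str.isIn "team" (PySem.Str.lower text) = b2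
      generalize PySem.Str.isIn "stakeholder" (PySem.Str.lower text) = b3
      generalize PySem.Str.isIn "leadership" (PySem.Str.lower text) = b4
      generalize PySem.Str.isIn "report" (PySem.Str.lower text) = b5
      generalize PySem.Str.isIn "document" (PySem.Str.lower text) = b6
      generalize PySem.Str.isIn "analysis" (PySem.Str.lower text) = b7
      generalize PySem.Str.isIn "data" (PySem.Str.lower text) = b8
      generalize PySem.Str.isIn "metric" (PySem.Str.lower text) = b9
      generalize PySem.Str.isIn "tool" (PySem.Str.lower text) = b10
      generalize PySem.Str.isIn "system" (PySem.Str.lower text) = b11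
      generalize PySem.Str.isIn "automation" (PySem.Str.lower text) = b12
      generalize PySem.Str.isIn "process" (PySem.Str.lower text) = b13
      revert b1 b2 b3 b4 b5 b6 b7 b8 b9 b10 b11 b12 b13
      decide
    · rw [pvBestGet_pain, pvScan_pain, fold_as_min]
      simp only [pvIndex, List.flatMap_cons, List.flatMap_nil, filtPain_p, filtPain_g, filtPain_c,
        filtPain_cust, ite_self, List.append_nil, List.any_cons, List.any_nil,
        Bool.or_false]
      generalize PySem.Str.isIn "delay" (PySem.Str.lower text) = b1
      generalize PySem.Str.isIn "blocked" (PySem.Str.lower text) = b2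
      generalize PySem.Str.isIn "risk" (PySem.Str.lower text) = b3
      generalize PySem.Str.isIn "urgent" (PySem.Str.lower text) = b4
      generalize PySem.Str.isIn "critical" (PySem.Str.lower text) = b5
      generalize PySem.Str.isIn "slow" (PySem.Str.lower text) = b6
      generalize PySem.Str.isIn "manual" (PySem.Str.lower text) = b7
      generalize PySem.Str.isIn "rework" (PySem.Str.lower text) = b8
      generalize PySem.Str.isIn "waiting" (PySem.Str.lower text) = b9
      revert b1 b2 b3 b4 b5 b6 b7 b8 b9
      decide
  · simp only [hp, if_false, Bool.false_eq_true, List.cons.injEq, Prod.mk.injEq, true_and, and_true]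
    refine ⟨?_, ?_⟩
    · rw [pvBestGet_cat, pvScan_fst, fold_as_min]
      simp only [pvIndex, List.flatMap_cons, List.flatMap_nil, filtCat_p, filtCat_g, filtCat_c,
        filtCat_cust, ite_self, List.nil_append, List.append_nil, List.any_cons, List.any_nil,
        Bool.or_false]
      generalize PySem.Str.isIn "customer" (PySem.Str.lower text) = b1
      generalize PySem.Str.isIn "team" (PySem.Str.lower text) = b2
      generalize PySem.Str.isIn "stakeholder" (PySem.Str.lower text) = b3
      generalize PySem.Str.isIn "leadership" (PySem.Str.lower text) = b4
      generalize PySem.Str.isIn "report" (PySem.Str.lower text) = b5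
      generalize PySem.Str.isIn "document" (PySem.Str.lower text) = b6
      generalize PySem.Str.isIn "analysis" (PySem.Str.lower text) = b7
      generalize PySem.Str.isIn "data" (PySem.Str.lower text) = b8
      generalize PySem.Str.isIn "metric" (PySem.Str.lower text) = b9
      generalize PySem.Str.isIn "tool" (PySem.Str.lower text) = b10
      generalize PySem.Str.isIn "system" (PySem.Str.lower text) = b11
      generalize PySem.Str.isIn "automation" (PySem.Str.lower text) = b12
      generalize PySem.Str.isIn "process" (PySem.Str.lower text) = b13
      revert b1 b2 b3 b4 b5 b6 b7 b8 b9 b10 b11 b12 b13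
      decide
    · rw [pvBestGet_gain, pvScan_gain, fold_as_min_gain]
      simp only [pvIndex, List.flatMap_cons, List.flatMap_nil, filtGain_p, filtGain_g, filtGain_c,
        filtGain_cust, ite_self, List.nil_append, List.append_nil, List.any_cons, List.any_nil,
        Bool.or_false]
      generalize PySem.Str.isIn "revenue" (PySem.Str.lower text) = b1
      generalize PySem.Str.isIn "growth" (PySem.Str.lower text) = b2
      generalize PySem.Str.isIn "customer" (PySem.Str.lower text) = b3
      generalize PySem.Str.isIn "value" (PySem.Str.lower text) = b4
      generalize PySem.Str.isIn "impact" (PySem.Str.lower text) = b5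
      generalize PySem.Str.isIn "clear" (PySem.Str.lower text) = b6
      generalize PySem.Str.isIn "faster" (PySem.Str.lower text) = b7
      generalize PySem.Str.isIn "quality" (PySem.Str.lower text) = b8
      generalize PySem.Str.isIn "focus" (PySem.Str.lower text) = b9
      revert b1 b2 b3 b4 b5 b6 b7 b8 b9
      decide
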